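-- pv_equiv track=rewrite | github.com/JaehoonShin2/coding-test | Programmers/문제풀이/Level0_옹알이.py | solution
-- ===== SOURCE A (Python) =====
-- from itertools import permutations as p
--
-- def solution(babbling):
--
--     answer = 0
--     token = ["aya", "ye", "woo", "ma" ]
--     p_token = []
--     for j in range(1, 5):
--         p_list = p([i for i in range(4)], j)
--         for node in p_list:
--             b_p = ''
--             for n in node:
--                 b_p += token[n]
--             p_token.append(b_p)
--
--     for b in babbling:
--         if b in p_token:
--             answer += 1
--
--     return answer
-- ===== SOURCE B (Python) =====
-- def solution(babbling):
--     tokens = ("aya", "ye", "woo", "ma")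
--     count = 0
--     for word in babbling:
--         rest = word
--         used = set()
--         while rest:
--             for i, t in enumerate(tokens):
--                 if i not in used and rest.startswith(t):
--                     used.add(i)
--                     rest = rest[len(t):]
--                     break
--             else:
--                 break
--         if rest == "" and used:
--             count += 1
--     return count
-- ===== Notes on version B (the rewrite author's own statement) =====
-- stated objective: simpler
-- what changed: A precomputes all 64 concatenations of 1-4 distinct tokens via itertools.permutations and tests each word for membership in that list; B instead parses each word greedily (token first letters are distinct, so parsing is deterministic), consuming unused tokens until the word is exhausted or stuck.
import Mathlib
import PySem

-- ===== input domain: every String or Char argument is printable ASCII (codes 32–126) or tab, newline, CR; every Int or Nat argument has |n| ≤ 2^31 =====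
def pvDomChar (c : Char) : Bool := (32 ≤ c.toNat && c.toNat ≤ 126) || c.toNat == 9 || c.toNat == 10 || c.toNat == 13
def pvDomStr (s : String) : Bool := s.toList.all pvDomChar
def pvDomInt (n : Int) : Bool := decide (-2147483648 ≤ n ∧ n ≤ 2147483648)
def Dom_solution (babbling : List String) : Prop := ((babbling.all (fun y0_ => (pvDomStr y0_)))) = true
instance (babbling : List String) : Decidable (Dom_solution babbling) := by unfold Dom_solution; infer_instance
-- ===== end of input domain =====

-- B replaces A's enumeration of all 64 distinct-token concatenations (built with itertools.permutations
-- and scanned per word) by a greedy single-pass parser per word; objective: simpler.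

-- ===== PORT A =====
-- itertools.permutations(pool, r) over a duplicate-free pool: all length-r sequences of distinct
-- elements, in lexicographic order of picked positions.
def pvPerms (l : List Nat) : Nat → List (List Nat)
  | 0 => [[]]
  | r + 1 => l.flatMap (fun x => (pvPerms (l.erase x) r).map (fun node => x :: node))

def solution (babbling : List String) : Int :=
  let token : List String := ["aya", "ye", "woo", "ma"]
  let p_token : List String :=
    (PySem.List.pyRange 1 5 1).foldl (fun acc j =>
      acc ++ (pvPerms [0, 1, 2, 3] j.toNat).map (fun node =>
        node.foldl (fun b_p n => b_p ++ token.getD n "") "")) []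
  babbling.foldl (fun answer b => if b ∈ p_token then answer + 1 else answer) 0

-- ===== PORT B =====
def pvTokens : List (List Char) := [['a','y','a'], ['y','e'], ['w','o','o'], ['m','a']]

-- the `while rest:` loop of Source B: consume the first unused token rest starts with, until stuck/empty
def pvLoop : Nat → List Char → PySem.Set Nat → List Char × PySem.Set Nat
  | 0, rest, used => (rest, used)
  | fuel + 1, rest, used =>
    if rest = [] then (rest, used)
    else
      match (List.range 4).find? (fun i =>
          !(PySem.Set.contains used i) && PySem.Chars.startswith rest (pvTokens.getD i [])) with
      | none => (rest, used)
      | some i => pvLoop fuel (rest.drop (pvTokens.getD i []).length) (PySem.Set.add used i)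

def pvCheck (w : List Char) : Bool :=
  let r := pvLoop w.length w PySem.Set.empty
  r.1 = [] && !(r.2 = ([] : List Nat))

def solution_alt (babbling : List String) : Int :=
  babbling.foldl (fun count word => if pvCheck word.toList then count + 1 else count) 0

-- ===== PRECONDITION & SPEC =====
def Spec_solution (babbling : List String) (out : Int) : Prop := out = solution_alt babbling
instance (babbling : List String) (out : Int) : Decidable (Spec_solution babbling out) := by unfold Spec_solution; infer_instance

-- ===== CLAIM (what is proved, stated in full; the proofs are below) =====
def Claim_equal_solution : Prop := ∀ (babbling : List String), Dom_solution babbling → Spec_solution babbling (solution babbling)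

-- ===== LEMMAS AND PROOFS =====

-- A's p_token, hoisted (proved equal to the let-bound list definitionally below)
def pvPT : List String :=
  (PySem.List.pyRange 1 5 1).foldl (fun acc j =>
    acc ++ (pvPerms [0, 1, 2, 3] j.toNat).map (fun node =>
      node.foldl (fun b_p n => b_p ++ ["aya", "ye", "woo", "ma"].getD n "") "")) []

def pvConcat (l : List Nat) : List Char := (l.map (fun i => pvTokens.getD i [])).flatten

lemma pvMem1 : ∀ a : Fin 4, pvConcat [a.1] ∈ pvPT.map String.toList := by decide
lemma pvMem2 : ∀ a b : Fin 4, a ≠ b → pvConcat [a.1, b.1] ∈ pvPT.map String.toList := by decide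
lemma pvMem3 : ∀ a b c : Fin 4, a ≠ b → a ≠ c → b ≠ c →
    pvConcat [a.1, b.1, c.1] ∈ pvPT.map String.toList := by decide
lemma pvMem4 : ∀ a b c d : Fin 4, a ≠ b → a ≠ c → a ≠ d → b ≠ c → b ≠ d → c ≠ d →
    pvConcat [a.1, b.1, c.1, d.1] ∈ pvPT.map String.toList := by decide

-- every nonempty duplicate-free sequence of token indices concatenates into p_token
lemma pvComplete (l : List Nat) (hn : l.Nodup) (hb : ∀ i ∈ l, i < 4) (hne : l ≠ []) :
    pvConcat l ∈ pvPT.map String.toList := by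
  match l with
  | [] => exact absurd rfl hne
  | [a] =>
    exact pvMem1 ⟨a, hb a (by simp)⟩
  | [a, b] =>
    have hab : a ≠ b := by have := (List.nodup_cons.mp hn).1; simpa using this
    exact pvMem2 ⟨a, hb a (by simp)⟩ ⟨b, hb b (by simp)⟩ (Fin.ne_of_val_ne hab)
  | [a, b, c] =>
    have h1 := (List.nodup_cons.mp hn).1
    have hn2 := (List.nodup_cons.mp hn).2
    have h2 := (List.nodup_cons.mp hn2).1
    have hab : a ≠ b := by simp at h1; exact h1.1
    have hac : a ≠ c := by simp at h1; exact h1.2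
    have hbc : b ≠ c := by simpa using h2
    exact pvMem3 ⟨a, hb a (by simp)⟩ ⟨b, hb b (by simp)⟩ ⟨c, hb c (by simp)⟩
      (Fin.ne_of_val_ne hab) (Fin.ne_of_val_ne hac) (Fin.ne_of_val_ne hbc)
  | [a, b, c, d] =>
    have h1 := (List.nodup_cons.mp hn).1
    have hn2 := (List.nodup_cons.mp hn).2
    have h2 := (List.nodup_cons.mp hn2).1
    have hn3 := (List.nodup_cons.mp hn2).2
    have h3 := (List.nodup_cons.mp hn3).1
    have hab : a ≠ b := by simp at h1; exact h1.1
    have hac : a ≠ c := by simp at h1; exact h1.2.1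
    have had : a ≠ d := by simp at h1; exact h1.2.2
    have hbc : b ≠ c := by simp at h2; exact h2.1
    have hbd : b ≠ d := by simp at h2; exact h2.2
    have hcd : c ≠ d := by simpa using h3
    exact pvMem4 ⟨a, hb a (by simp)⟩ ⟨b, hb b (by simp)⟩ ⟨c, hb c (by simp)⟩ ⟨d, hb d (by simp)⟩
      (Fin.ne_of_val_ne hab) (Fin.ne_of_val_ne hac) (Fin.ne_of_val_ne had)
      (Fin.ne_of_val_ne hbc) (Fin.ne_of_val_ne hbd) (Fin.ne_of_val_ne hcd)
  | a :: b :: c :: d :: e :: t =>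
    have ha := hb a (by simp); have hbb := hb b (by simp); have hc := hb c (by simp)
    have hd := hb d (by simp); have he := hb e (by simp)
    simp [List.nodup_cons, List.mem_cons] at hn
    omega

-- greedy success reconstructs such a sequence
lemma pvLoopSound : ∀ (fuel : Nat) (rest : List Char) (used : PySem.Set Nat),
    rest.length ≤ fuel → (pvLoop fuel rest used).1 = [] →
    ∃ l : List Nat, l.Nodup ∧ (∀ i ∈ l, i < 4) ∧ (∀ i ∈ l, i ∉ used) ∧ rest = pvConcat l := by
  intro fuel
  induction fuel with
  | zero =>
    intro rest used hlen h
    exact ⟨[], by simp, by simp, by simp,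
      by simpa [pvLoop] using h⟩
  | succ n ih =>
    intro rest used hlen h
    by_cases hre : rest = []
    · exact ⟨[], by simp, by simp, by simp, hre⟩
    · simp only [pvLoop, if_neg hre] at h
      cases hfind : (List.range 4).find? (fun i =>
          !(PySem.Set.contains used i) && PySem.Chars.startswith rest (pvTokens.getD i [])) with
      | none => rw [hfind] at h; exact absurd h hre
      | some i =>
        rw [hfind] at h
        have hi4 : i < 4 := by simpa using List.mem_of_find?_eq_some hfind
        have hpred := List.find?_some hfind
        simp only [Bool.and_eq_true, Bool.not_eq_true'] at hpred
        obtain ⟨hni, hsw⟩ := hpred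
        have hiu : i ∉ used := fun hm => by
          rw [(PySem.Set.contains_iff used i).2 hm] at hni; exact Bool.true_eq_false.mp hni
        obtain ⟨suf, hsuf⟩ := (PySem.Chars.startswith_iff rest (pvTokens.getD i [])).1 hsw
        have htl : 2 ≤ (pvTokens.getD i []).length := by
          interval_cases i <;> simp [pvTokens]
        have hdrop : rest.drop (pvTokens.getD i []).length = suf := by
          rw [← hsuf]; simp
        have hlen' : (rest.drop (pvTokens.getD i []).length).length ≤ n := by
          simp only [List.length_drop]
          have : 1 ≤ rest.length := by
            cases rest with
            | nil => exact absurd rfl hre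
            | cons x xs => simp
          omega
        obtain ⟨l, hnd, hbd, hfr, hco⟩ := ih _ _ hlen' h
        refine ⟨i :: l, ?_, ?_, ?_, ?_⟩
        · exact List.nodup_cons.mpr
            ⟨fun hil => (hfr i hil) ((PySem.Set.mem_add used i i).2 (Or.inr rfl)), hnd⟩
        · intro j hj
          rcases List.mem_cons.mp hj with h' | h'
          · exact h' ▸ hi4
          · exact hbd j h'
        · intro j hj
          rcases List.mem_cons.mp hj with h' | h'
          · exact h' ▸ hiu
          · exact fun hju => (hfr j h') ((PySem.Set.mem_add used i j).2 (Or.inl hju))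
        · have hstep : pvConcat (i :: l) = pvTokens.getD i [] ++ pvConcat l := by
            simp [pvConcat]
          rw [← hsuf, hstep, ← hco, hdrop]

-- every word of p_token passes the greedy check
lemma pvCheckAll : ∀ w ∈ pvPT.map String.toList, pvCheck w = true := by decide

-- per-word agreement: membership in p_token ↔ greedy check
lemma pvPoint (b : String) : (b ∈ pvPT) = (pvCheck b.toList = true) := by
  by_cases hb : b ∈ pvPT
  · simp only [hb, eq_iff_iff, true_iff]
    exact pvCheckAll _ (List.mem_map_of_mem hb)
  · simp only [hb, eq_iff_iff, false_iff]
    intro hc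
    apply hb
    by_cases hw : b.toList = []
    · rw [hw] at hc
      simp [pvCheck, pvLoop, PySem.Set.empty] at hc
    · unfold pvCheck at hc
      simp only [Bool.and_eq_true, decide_eq_true_eq, Bool.not_eq_true',
        decide_eq_false_iff_not] at hc
      obtain ⟨h1, _⟩ := hc
      obtain ⟨l, hnd, hbd, _, hco⟩ :=
        pvLoopSound b.toList.length b.toList PySem.Set.empty le_rfl h1
      have hlne : l ≠ [] := by
        intro hl; rw [hl] at hco; simp [pvConcat] at hco
        exact hw (by rw [hco]; rfl)
      have hmem := hco ▸ pvComplete l hnd hbd hlne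
      obtain ⟨s, hs, hse⟩ := List.mem_map.mp hmem
      rwa [String.toList_injective hse] at hs

-- fold-level agreement
lemma pvFold (bs : List String) : ∀ acc : Int,
    bs.foldl (fun answer b => if b ∈ pvPT then answer + 1 else answer) acc =
    bs.foldl (fun count word => if pvCheck word.toList then count + 1 else count) acc := by
  induction bs with
  | nil => intro acc; rfl
  | cons b bs ih =>
    intro acc
    simp only [List.foldl_cons, pvPoint b]
    exact ih _

-- ===== VERDICT (by name: the statement is the Claim_ definition above) =====
theorem solution_spec : Claim_equal_solution := by
  intro babbling _
  unfold Spec_solution solution solution_alt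
  exact pvFold babbling 0
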